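-- pv_equiv track=rewrite | github.com/academictorrents/academictorrents_uploader | torrent.py | calculate_piece_length
-- ===== SOURCE A (Python) =====
-- KIB = 2**10
--
-- MIB = KIB * KIB
--
-- def calculate_piece_length(size):
--     """
--     Calculate a reasonable piece length for the given torrent size.
--
--     Proceeding:
--     1. Start with 256 KIB.
--     2. While piece count > 2000: double piece length.
--     3. While piece count < 8:    use half the piece length.
--
--     However, enforce these bounds:
--     - minimum piece length = 16 KiB.
--     - maximum piece length =  1 MiB.
--     """
--     if not isinstance(size, int):
--         raise TypeError("size must be instance of: int")
--
--     if size <= 0: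
--         raise ValueError("size must be greater than 0 (given: %d)" % size)
--
--     if size < 16 * KIB:
--         return 16 * KIB
--
--     piece_length = 256 * KIB
--
--     while size / piece_length > 2000:
--         piece_length *= 2
--
--     while size / piece_length < 8:
--         piece_length /= 2
--
--     # Ensure that: 16 KIB <= piece_length <= 1 * MIB
--     piece_length = max(min(piece_length, 1 * MIB), 16 * KIB)
--
--     return int(piece_length)
-- ===== SOURCE B (Python) =====
-- KIB = 2**10
--
-- MIB = KIB * KIB
--
-- def calculate_piece_length(size):
--     if not isinstance(size, int):
--         raise TypeError("size must be instance of: int")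
--
--     if size <= 0:
--         raise ValueError("size must be greater than 0 (given: %d)" % size)
--
--     if size < 16 * KIB:
--         return 16 * KIB
--
--     if size > 2000 * 256 * KIB:
--         # smallest power of two p with size <= 2000 * 256*KIB * p
--         piece_length = (256 * KIB) << ((size - 1) // (2000 * 256 * KIB)).bit_length()
--     else:
--         # largest power of two <= size // 8, capped at 256 KiB
--         piece_length = 1 << min(18, (size // 8).bit_length() - 1)
--
--     return max(min(piece_length, MIB), 16 * KIB)
-- ===== Notes on version B (the rewrite author's own statement) =====
-- stated objective: simpler
-- what changed: Replaces both while-loops by closed-form bit_length arithmetic: the doubling loop becomes 256KiB << ceil_log2(ceil(size/(2000*256KiB))) and the halving loop becomes the largest power of two <= size//8 capped at 256KiB, followed by the same clamp.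
import Mathlib
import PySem

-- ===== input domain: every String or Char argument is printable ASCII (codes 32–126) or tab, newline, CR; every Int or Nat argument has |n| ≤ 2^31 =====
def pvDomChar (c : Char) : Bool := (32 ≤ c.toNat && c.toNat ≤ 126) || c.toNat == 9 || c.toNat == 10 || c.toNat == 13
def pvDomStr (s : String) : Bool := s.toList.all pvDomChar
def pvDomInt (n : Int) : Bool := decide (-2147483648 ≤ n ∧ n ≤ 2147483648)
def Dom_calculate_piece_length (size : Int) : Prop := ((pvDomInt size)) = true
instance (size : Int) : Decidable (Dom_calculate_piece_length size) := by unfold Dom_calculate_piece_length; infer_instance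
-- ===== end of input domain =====

-- B replaces A's two while-loops by closed-form bit_length arithmetic (objective: simpler).

-- ===== PORT A =====
def pvKIB : Int := 2 ^ 10
def pvMIB : Int := pvKIB * pvKIB

-- A's doubling loop `while size / piece_length > 2000: piece_length *= 2`.
-- The fuel only makes the recursion total; 64 always suffices on Dom (≤ 3 iterations).
-- Python compares with exact float division; here piece_length is a power of two and
-- |size| ≤ 2^31 < 2^53, so `size / pl > 2000` is exactly `2000 * pl < size`.
def pvDblA (size : Int) : Nat → Int → Int
  | 0, pl => pl
  | fuel + 1, pl => if 2000 * pl < size then pvDblA size fuel (pl * 2) else pl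

-- A's halving loop `while size / piece_length < 8: piece_length /= 2`.
-- On every reachable state pl is an even power of two (the loop stops at ≥ 2^11 for
-- size ≥ 16 KiB), so Python's float `pl /= 2` is exactly floor division by 2.
def pvHlvA (size : Int) : Nat → Int → Int
  | 0, pl => pl
  | fuel + 1, pl => if size < 8 * pl then pvHlvA size fuel (PySem.Int.floordiv pl 2) else pl

def calculate_piece_length (size : Int) : Int :=
  if size < 16 * pvKIB then 16 * pvKIB
  else
    let pl := 256 * pvKIB
    let pl := pvDblA size 64 pl
    let pl := pvHlvA size 64 pl
    max (min pl (1 * pvMIB)) (16 * pvKIB)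

-- ===== PORT B =====
-- transliteration of Source B; `<< k` is ported as `* 2 ^ k`, `.bit_length()` as PySem.Int.bitLength
def calculate_piece_length_alt (size : Int) : Int :=
  if size < 16 * pvKIB then 16 * pvKIB
  else
    let pl : Int :=
      if 2000 * 256 * pvKIB < size then
        -- smallest power of two p with size ≤ 2000 * 256*KIB * p
        (256 * pvKIB) * 2 ^ (PySem.Int.bitLength (PySem.Int.floordiv (size - 1) (2000 * 256 * pvKIB)))
      else
        -- largest power of two ≤ size // 8, capped at 256 KiB
        2 ^ (min 18 ((PySem.Int.bitLength (PySem.Int.floordiv size 8) : Int) - 1)).toNat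
    max (min pl pvMIB) (16 * pvKIB)

-- ===== PRECONDITION & SPEC =====
-- Pre_ excludes exactly the inputs where A raises: size ≤ 0 (ValueError).
def Pre_calculate_piece_length (size : Int) : Prop := 0 < size
instance (size : Int) : Decidable (Pre_calculate_piece_length size) := by unfold Pre_calculate_piece_length; infer_instance
def pvWitness_calculate_piece_length : Int := 1

def Spec_calculate_piece_length (size : Int) (out : Int) : Prop := out = calculate_piece_length_alt size
instance (size : Int) (out : Int) : Decidable (Spec_calculate_piece_length size out) := by unfold Spec_calculate_piece_length; infer_instance

-- ===== CLAIM (what is proved, stated in full; the proofs are below) =====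
def Claim_equal_calculate_piece_length : Prop := ∀ (size : Int), Dom_calculate_piece_length size → Pre_calculate_piece_length size → Spec_calculate_piece_length size (calculate_piece_length size)

-- ===== LEMMAS AND PROOFS =====

-- evaluation of A's doubling loop: it doubles exactly k times
lemma pvDbl_eval (size : Int) (k : Nat) : ∀ (fuel : Nat) (pl : Int), k ≤ fuel →
    size ≤ 2000 * (pl * 2 ^ k) →
    (∀ j, j < k → 2000 * (pl * 2 ^ j) < size) →
    pvDblA size fuel pl = pl * 2 ^ k := by
  induction k with
  | zero =>
    intro fuel pl _ hstop _
    cases fuel with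
    | zero => simp [pvDblA]
    | succ f =>
      simp only [pow_zero, mul_one] at hstop
      simp [pvDblA, not_lt.mpr hstop]
  | succ k ih =>
    intro fuel pl hf hstop hgo
    cases fuel with
    | zero => omega
    | succ f =>
      have h0 : 2000 * pl < size := by
        have := hgo 0 (by omega); simpa using this
      have : pvDblA size (f + 1) pl = pvDblA size f (pl * 2) := by
        simp [pvDblA, h0]
      rw [this, ih f (pl * 2) (by omega)
        (by rw [show pl * 2 * 2 ^ k = pl * 2 ^ (k + 1) by ring]; exact hstop)
        (by intro j hj
            rw [show pl * 2 * 2 ^ j = pl * 2 ^ (j + 1) by ring]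
            exact hgo (j + 1) (by omega))]
      ring

-- evaluation of A's halving loop from 2^(e+k) down to 2^e
lemma pvHlv_eval (size : Int) (e : Nat) : ∀ (k fuel : Nat), k ≤ fuel →
    (k ≠ 0 → size < 8 * 2 ^ (e + 1)) →
    8 * 2 ^ e ≤ size →
    pvHlvA size fuel ((2 : Int) ^ (e + k)) = 2 ^ e := by
  intro k
  induction k with
  | zero =>
    intro fuel _ _ hstop
    cases fuel with
    | zero => simp [pvHlvA]
    | succ f => simp [pvHlvA, not_lt.mpr hstop]
  | succ k ih =>
    intro fuel hf htop hstop
    cases fuel with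
    | zero => omega
    | succ f =>
      have hcond : size < 8 * (2 : Int) ^ (e + (k + 1)) := by
        have h1 := htop (by omega)
        have h2 : (2 : Int) ^ (e + 1) ≤ 2 ^ (e + (k + 1)) := by
          apply pow_le_pow_right₀ (by norm_num); omega
        omega
      have hhalf : PySem.Int.floordiv ((2 : Int) ^ (e + (k + 1))) 2 = 2 ^ (e + k) := by
        rw [PySem.Int.floordiv_eq_ediv_of_pos (by norm_num)]
        rw [show e + (k + 1) = (e + k) + 1 by omega, pow_succ]
        exact Int.mul_ediv_cancel _ (by norm_num)
      have : pvHlvA size (f + 1) ((2 : Int) ^ (e + (k + 1))) = pvHlvA size f (2 ^ (e + k)) := by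
        simp only [pvHlvA, if_pos hcond, hhalf]
      rw [this]
      exact ih f (by omega) (fun hk => htop (by omega)) hstop

-- run the halving loop from 256 KiB down to 2^e
lemma pvMidcase (size : Int) (e : Nat) (he : e ≤ 18)
    (hlo : 8 * 2 ^ e ≤ size) (hhi : e < 18 → size < 8 * 2 ^ (e + 1)) :
    pvHlvA size 64 262144 = 2 ^ e := by
  have h18 : e + (18 - e) = 18 := by omega
  have h := pvHlv_eval size e (18 - e) 64 (by omega)
    (fun hk => hhi (by omega)) hlo
  rw [h18] at h
  norm_num at h
  exact h

-- ===== VERDICT (by name: the statement is the Claim_ definition above) =====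
theorem calculate_piece_length_spec : Claim_equal_calculate_piece_length := by
  intro size hdom hpre
  unfold Dom_calculate_piece_length pvDomInt at hdom
  rw [decide_eq_true_iff] at hdom
  unfold Pre_calculate_piece_length at hpre
  unfold Spec_calculate_piece_length calculate_piece_length calculate_piece_length_alt pvMIB pvKIB
  norm_num
  by_cases hsmall : size < 16384
  · rw [if_pos hsmall, if_pos hsmall]
  · rw [if_neg hsmall, if_neg hsmall]
    rw [not_lt] at hsmall
    by_cases hbig : 524288000 < size
    · -- doubling branch: 1, 2 or 3 doublings, no halving
      rw [if_pos hbig]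
      by_cases h2 : size ≤ 1048576000
      · have hD : pvDblA size 64 262144 = 262144 * 2 ^ 1 :=
          pvDbl_eval size 1 64 262144 (by omega)
            (by have : (2000:Int) * (262144 * 2 ^ 1) = 1048576000 := by norm_num
                omega)
            (by intro j hj
                have hj0 : j = 0 := by omega
                subst hj0
                simp only [pow_zero, mul_one]
                omega)
        have hH : pvHlvA size 64 524288 = (2 : Int) ^ 19 := by
          have h := pvHlv_eval size 19 0 64 (by omega) (by omega)
            (by have : (8:Int) * 2 ^ 19 = 4194304 := by norm_num
                omega)
          norm_num at h ⊢
          exact h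
        have hq1 : (size - 1) / 524288000 = 1 := by omega
        rw [hq1, hD]
        norm_num [hH]
        rw [show PySem.Int.bitLength 1 = 1 from by decide]
        norm_num
      · by_cases h3 : size ≤ 2097152000
        · have hD : pvDblA size 64 262144 = 262144 * 2 ^ 2 :=
            pvDbl_eval size 2 64 262144 (by omega)
              (by have : (2000:Int) * (262144 * 2 ^ 2) = 2097152000 := by norm_num
                  omega)
              (by intro j hj
                  interval_cases j <;> norm_num <;> omega)
          have hH : pvHlvA size 64 1048576 = (2 : Int) ^ 20 := by
            have h := pvHlv_eval size 20 0 64 (by omega) (by omega)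
              (by have : (8:Int) * 2 ^ 20 = 8388608 := by norm_num
                  omega)
            norm_num at h ⊢
            exact h
          have hq2 : (size - 1) / 524288000 = 2 ∨ (size - 1) / 524288000 = 3 := by omega
          rw [hD]
          norm_num [hH]
          rcases hq2 with h | h <;> rw [h]
          · rw [show PySem.Int.bitLength 2 = 2 from by decide]; norm_num
          · rw [show PySem.Int.bitLength 3 = 2 from by decide]; norm_num
        · have hD : pvDblA size 64 262144 = 262144 * 2 ^ 3 :=
            pvDbl_eval size 3 64 262144 (by omega)
              (by have : (2000:Int) * (262144 * 2 ^ 3) = 4194304000 := by norm_num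
                  omega)
              (by intro j hj
                  interval_cases j <;> norm_num <;> omega)
          have hH : pvHlvA size 64 2097152 = (2 : Int) ^ 21 := by
            have h := pvHlv_eval size 21 0 64 (by omega) (by omega)
              (by have : (8:Int) * 2 ^ 21 = 16777216 := by norm_num
                  omega)
            norm_num at h ⊢
            exact h
          have hq3 : (size - 1) / 524288000 = 4 := by omega
          rw [hq3, hD]
          norm_num [hH]
          rw [show PySem.Int.bitLength 4 = 3 from by decide]
          norm_num
    · -- halving branch: no doubling, bitLength of size // 8 decides everything
      rw [if_neg hbig]
      rw [not_lt] at hbig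
      have hD : pvDblA size 64 262144 = 262144 * 2 ^ 0 :=
        pvDbl_eval size 0 64 262144 (by omega)
          (by simp only [pow_zero, mul_one]; omega) (by omega)
      norm_num at hD
      rw [hD]
      have h8 : 8 * (size / 8) ≤ size ∧ size < 8 * (size / 8) + 8 ∧ 2048 ≤ size / 8 := by omega
      set n : Int := size / 8 with hn
      have hn0 : (0 : Int) < n := by omega
      set k : Nat := PySem.Int.bitLength n with hk
      have ha := PySem.Int.two_pow_bitLength_le n (by omega)
      have hb := PySem.Int.lt_two_pow_bitLength n
      rw [← hk] at ha hb
      have ha' : ((2 : Int)) ^ (k - 1) ≤ n := by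
        rw [← Int.natAbs_of_nonneg (le_of_lt hn0)]
        exact_mod_cast ha
      have hb' : n < (2 : Int) ^ k := by
        rw [← Int.natAbs_of_nonneg (le_of_lt hn0)]
        exact_mod_cast hb
      have hk12 : 12 ≤ k := by
        by_contra h
        have h1 : (2 : Int) ^ k ≤ 2 ^ 11 := by
          apply pow_le_pow_right₀ (by norm_num); omega
        have h2 : (2 : Int) ^ 11 = 2048 := by norm_num
        omega
      by_cases he : k ≤ 18
      · -- result is 2^(k-1), with the 16 KiB clamp applied identically on both sides
        have hbound : size < 8 * 2 ^ ((k - 1) + 1) := by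
          have h1 : n + 1 ≤ 2 ^ k := by omega
          have h2 : (8 : Int) * (n + 1) ≤ 8 * 2 ^ k :=
            mul_le_mul_of_nonneg_left h1 (by norm_num)
          have hkk : (k - 1) + 1 = k := by omega
          rw [hkk]
          omega
        have hlo : (8 : Int) * 2 ^ (k - 1) ≤ size := by
          have h1 : (8 : Int) * 2 ^ (k - 1) ≤ 8 * n :=
            mul_le_mul_of_nonneg_left ha' (by norm_num)
          omega
        have hA := pvMidcase size (k - 1) (by omega) hlo (fun _ => hbound)
        rw [hA]
        have hmin : (min 18 ((k : Int) - 1)).toNat = k - 1 := by omega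
        rw [hmin]
      · -- k ≥ 19 : the loop never fires, result 256 KiB; min caps B at 18 too
        have h18 : (2 : Int) ^ 18 ≤ n := by
          have h1 : ((2 : Int)) ^ 18 ≤ 2 ^ (k - 1) := by
            apply pow_le_pow_right₀ (by norm_num); omega
          omega
        have hlo : (8 : Int) * 2 ^ 18 ≤ size := by
          have h1 : (8 : Int) * 2 ^ 18 ≤ 8 * n :=
            mul_le_mul_of_nonneg_left h18 (by norm_num)
          omega
        have hA := pvMidcase size 18 (by omega) hlo (by omega)
        rw [hA]
        have hmin : (min 18 ((k : Int) - 1)).toNat = 18 := by omega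
        rw [hmin]
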